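-- pv_equiv track=rewrite | github.com/sebasnaa/P1-MBHB | Busqueda_local_v2.py | accion_posible
-- ===== SOURCE A (Python) =====
-- def accion_posible(bicicletas_input,estacion,bicicletas_en_slots,huecos_disponibles_en_slots):
--     # queremos guardar bicis
--     # estacion =  estacion -1
--     if(bicicletas_input>0):
--         if huecos_disponibles_en_slots[estacion] >= bicicletas_input:
--             bicicletas_en_slots[estacion] = bicicletas_en_slots[estacion]+bicicletas_input
--             huecos_disponibles_en_slots[estacion] = huecos_disponibles_en_slots[estacion]-bicicletas_input
--             return 0,bicicletas_en_slots,huecos_disponibles_en_slots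
--         elif huecos_disponibles_en_slots[estacion] >0:
--             while huecos_disponibles_en_slots[estacion] > 0:
--                 bicicletas_input = bicicletas_input-1
--                 bicicletas_en_slots[estacion] = bicicletas_en_slots[estacion] + 1
--                 huecos_disponibles_en_slots[estacion] = huecos_disponibles_en_slots[estacion] - 1
--             return bicicletas_input,bicicletas_en_slots,huecos_disponibles_en_slots
--         else:
--             return bicicletas_input,bicicletas_en_slots,huecos_disponibles_en_slots
--     else:
--         #queremos sacar bicis
--         #se utiliza un valor negativo en bicicletas_input por tanto *-1
--         aux = (bicicletas_input *(-1))
--         if bicicletas_en_slots[estacion] >= aux: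
--             #se suma un valor neg por tanto se resta
--             bicicletas_en_slots[estacion] = bicicletas_en_slots[estacion]-aux
--             #se resta un valor neg por tanto se suma
--             huecos_disponibles_en_slots[estacion] = huecos_disponibles_en_slots[estacion]+aux
--
--
--             return 0,bicicletas_en_slots,huecos_disponibles_en_slots
--         elif bicicletas_en_slots[estacion] > 0:
--             while bicicletas_en_slots[estacion] >0:
--                 bicicletas_en_slots[estacion] = bicicletas_en_slots[estacion]-1
--                 huecos_disponibles_en_slots[estacion]  = huecos_disponibles_en_slots[estacion] + 1
--                 bicicletas_input+=1
--
--             return bicicletas_input,bicicletas_en_slots,huecos_disponibles_en_slots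
--         else:
--             return bicicletas_input,bicicletas_en_slots,huecos_disponibles_en_slots
-- ===== SOURCE B (Python) =====
-- def accion_posible(bicicletas_input, estacion, bicicletas_en_slots, huecos_disponibles_en_slots):
--     if bicicletas_input > 0:
--         # deposit: move as many as the free slots allow, in one step
--         moved = min(bicicletas_input, max(huecos_disponibles_en_slots[estacion], 0))
--         bicicletas_en_slots[estacion] += moved
--         huecos_disponibles_en_slots[estacion] -= moved
--         return bicicletas_input - moved, bicicletas_en_slots, huecos_disponibles_en_slots
--     else:
--         # withdraw: move as many as the parked bikes allow, in one step
--         moved = min(-bicicletas_input, max(bicicletas_en_slots[estacion], 0))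
--         bicicletas_en_slots[estacion] -= moved
--         huecos_disponibles_en_slots[estacion] += moved
--         return bicicletas_input + moved, bicicletas_en_slots, huecos_disponibles_en_slots
-- ===== Notes on version B (the rewrite author's own statement) =====
-- stated objective: simpler
-- what changed: Replaces A's three-way case analysis and the two unit-step while loops with one clamped closed form per branch: moved = min(request, max(available, 0)), applied in a single update.
-- outside the precondition, e.g. on accion_posible(1, 0, [], [0]): A returns (1, [], [0]), B raises IndexError
import Mathlib
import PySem

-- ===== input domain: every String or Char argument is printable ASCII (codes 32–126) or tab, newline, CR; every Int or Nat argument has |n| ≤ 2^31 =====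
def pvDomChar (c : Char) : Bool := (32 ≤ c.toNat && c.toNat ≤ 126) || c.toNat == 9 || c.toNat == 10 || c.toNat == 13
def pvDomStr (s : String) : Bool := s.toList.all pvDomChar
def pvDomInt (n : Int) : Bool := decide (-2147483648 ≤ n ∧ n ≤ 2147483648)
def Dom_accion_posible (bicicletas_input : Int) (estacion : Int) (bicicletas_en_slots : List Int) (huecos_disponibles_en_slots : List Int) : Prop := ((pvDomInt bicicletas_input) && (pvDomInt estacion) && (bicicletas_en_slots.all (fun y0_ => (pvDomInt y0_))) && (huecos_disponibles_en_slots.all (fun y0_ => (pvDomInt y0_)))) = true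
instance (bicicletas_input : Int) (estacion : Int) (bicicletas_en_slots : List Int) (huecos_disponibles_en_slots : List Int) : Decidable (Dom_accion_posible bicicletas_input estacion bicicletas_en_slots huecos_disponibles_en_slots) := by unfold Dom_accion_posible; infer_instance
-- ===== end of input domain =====

-- ===== PORT A =====
-- One honest line: B replaces A's three-way case analysis and unit-step while loops
-- with a single clamped (min/max) closed-form update per branch; A mutates its list
-- arguments in place, so the equivalence proved here is about the RETURN value only.

-- A's deposit while loop: while huecos > 0: inp -= 1; b += 1; h -= 1
def pvDepositLoop (inp b h : Int) : Int × Int × Int :=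
  if h > 0 then pvDepositLoop (inp - 1) (b + 1) (h - 1) else (inp, b, h)
termination_by h.toNat
decreasing_by omega

-- A's withdraw while loop: while b > 0: b -= 1; h += 1; inp += 1
def pvWithdrawLoop (inp b h : Int) : Int × Int × Int :=
  if b > 0 then pvWithdrawLoop (inp + 1) (b - 1) (h + 1) else (inp, b, h)
termination_by b.toNat
decreasing_by omega

def accion_posible (bicicletas_input : Int) (estacion : Int) (bicicletas_en_slots : List Int) (huecos_disponibles_en_slots : List Int) : Int × List Int × List Int :=
  if bicicletas_input > 0 then
    let h := PySem.List.pyGetD huecos_disponibles_en_slots estacion 0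
    if h ≥ bicicletas_input then
      (0,
       PySem.List.pySetD bicicletas_en_slots estacion (PySem.List.pyGetD bicicletas_en_slots estacion 0 + bicicletas_input),
       PySem.List.pySetD huecos_disponibles_en_slots estacion (h - bicicletas_input))
    else if h > 0 then
      let r := pvDepositLoop bicicletas_input (PySem.List.pyGetD bicicletas_en_slots estacion 0) h
      (r.1,
       PySem.List.pySetD bicicletas_en_slots estacion r.2.1,
       PySem.List.pySetD huecos_disponibles_en_slots estacion r.2.2)
    else
      (bicicletas_input, bicicletas_en_slots, huecos_disponibles_en_slots)
  else
    let aux := bicicletas_input * (-1)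
    let b := PySem.List.pyGetD bicicletas_en_slots estacion 0
    if b ≥ aux then
      (0,
       PySem.List.pySetD bicicletas_en_slots estacion (b - aux),
       PySem.List.pySetD huecos_disponibles_en_slots estacion (PySem.List.pyGetD huecos_disponibles_en_slots estacion 0 + aux))
    else if b > 0 then
      let r := pvWithdrawLoop bicicletas_input b (PySem.List.pyGetD huecos_disponibles_en_slots estacion 0)
      (r.1,
       PySem.List.pySetD bicicletas_en_slots estacion r.2.1,
       PySem.List.pySetD huecos_disponibles_en_slots estacion r.2.2)
    else
      (bicicletas_input, bicicletas_en_slots, huecos_disponibles_en_slots)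

-- ===== PORT B =====
def accion_posible_alt (bicicletas_input : Int) (estacion : Int) (bicicletas_en_slots : List Int) (huecos_disponibles_en_slots : List Int) : Int × List Int × List Int :=
  if bicicletas_input > 0 then
    let moved := min bicicletas_input (max (PySem.List.pyGetD huecos_disponibles_en_slots estacion 0) 0)
    (bicicletas_input - moved,
     PySem.List.pySetD bicicletas_en_slots estacion (PySem.List.pyGetD bicicletas_en_slots estacion 0 + moved),
     PySem.List.pySetD huecos_disponibles_en_slots estacion (PySem.List.pyGetD huecos_disponibles_en_slots estacion 0 - moved))
  else
    let moved := min (-bicicletas_input) (max (PySem.List.pyGetD bicicletas_en_slots estacion 0) 0)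
    (bicicletas_input + moved,
     PySem.List.pySetD bicicletas_en_slots estacion (PySem.List.pyGetD bicicletas_en_slots estacion 0 - moved),
     PySem.List.pySetD huecos_disponibles_en_slots estacion (PySem.List.pyGetD huecos_disponibles_en_slots estacion 0 + moved))

-- ===== PRECONDITION & SPEC =====
-- Pre_ excludes inputs where estacion is not a valid (possibly negative) Python index into
-- BOTH lists: there A either raises IndexError, or (when nothing can be moved) returns
-- without ever touching the shorter list, while B's single-update form always indexes both
-- lists and raises there.
def Pre_accion_posible (bicicletas_input : Int) (estacion : Int) (bicicletas_en_slots : List Int) (huecos_disponibles_en_slots : List Int) : Prop :=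
  PySem.Raise.InRange bicicletas_en_slots.length estacion ∧
  PySem.Raise.InRange huecos_disponibles_en_slots.length estacion
instance (bicicletas_input : Int) (estacion : Int) (bicicletas_en_slots : List Int) (huecos_disponibles_en_slots : List Int) : Decidable (Pre_accion_posible bicicletas_input estacion bicicletas_en_slots huecos_disponibles_en_slots) := by unfold Pre_accion_posible; infer_instance

def pvWitness_accion_posible : Int × Int × List Int × List Int := (2, 0, [1, 3], [4, 0])

def Spec_accion_posible (bicicletas_input : Int) (estacion : Int) (bicicletas_en_slots : List Int) (huecos_disponibles_en_slots : List Int) (out : Int × List Int × List Int) : Prop := out = accion_posible_alt bicicletas_input estacion bicicletas_en_slots huecos_disponibles_en_slots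
instance (bicicletas_input : Int) (estacion : Int) (bicicletas_en_slots : List Int) (huecos_disponibles_en_slots : List Int) (out : Int × List Int × List Int) : Decidable (Spec_accion_posible bicicletas_input estacion bicicletas_en_slots huecos_disponibles_en_slots out) := by unfold Spec_accion_posible; infer_instance

-- ===== CLAIM (what is proved, stated in full; the proofs are below) =====
def Claim_equal_accion_posible : Prop := ∀ (bicicletas_input : Int) (estacion : Int) (bicicletas_en_slots : List Int) (huecos_disponibles_en_slots : List Int), Dom_accion_posible bicicletas_input estacion bicicletas_en_slots huecos_disponibles_en_slots → Pre_accion_posible bicicletas_input estacion bicicletas_en_slots huecos_disponibles_en_slots → Spec_accion_posible bicicletas_input estacion bicicletas_en_slots huecos_disponibles_en_slots (accion_posible bicicletas_input estacion bicicletas_en_slots huecos_disponibles_en_slots)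

-- ===== LEMMAS AND PROOFS =====
theorem pvDepositLoop_closed (inp b h : Int) (hh : 0 ≤ h) :
    pvDepositLoop inp b h = (inp - h, b + h, 0) := by
  induction h, hh using Int.le_induction generalizing inp b with
  | base => rw [pvDepositLoop]; simp
  | succ h hh ih =>
      rw [pvDepositLoop, if_pos (by omega)]
      rw [show h + 1 - 1 = h by ring, ih]
      simp only [Prod.mk.injEq]
      exact ⟨by ring, by ring, trivial⟩

theorem pvWithdrawLoop_closed (inp b h : Int) (hb : 0 ≤ b) :
    pvWithdrawLoop inp b h = (inp + b, 0, h + b) := by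
  induction b, hb using Int.le_induction generalizing inp h with
  | base => rw [pvWithdrawLoop]; simp
  | succ b hb ih =>
      rw [pvWithdrawLoop, if_pos (by omega)]
      rw [show b + 1 - 1 = b by ring, ih]
      simp only [Prod.mk.injEq]
      exact ⟨by ring, trivial, by ring⟩

theorem pySetD_pyGetD_self (xs : List Int) (i : Int)
    (hi : PySem.Raise.InRange xs.length i) :
    PySem.List.pySetD xs i (PySem.List.pyGetD xs i 0) = xs := by
  simp only [PySem.Raise.InRange, PySem.List.pySetD, PySem.List.pySet?,
    PySem.List.pyGetD, PySem.List.pyGet?, PySem.List.pyIdx?] at *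
  by_cases h0 : 0 ≤ i
  · have hk : i.toNat < xs.length := by omega
    simp [h0, hi.2, List.set_getElem_self]
  · have hk : xs.length - (-i).toNat < xs.length := by omega
    simp [h0, hi.1, List.getElem?_eq_getElem hk, List.set_getElem_self]

-- ===== VERDICT (by name: the statement is the Claim_ definition above) =====
theorem accion_posible_spec : Claim_equal_accion_posible := by
  intro inp est bs hs _ hpre
  obtain ⟨hbs, hhs⟩ := hpre
  unfold Spec_accion_posible accion_posible accion_posible_alt
  set b := PySem.List.pyGetD bs est 0 with hbdef
  set h := PySem.List.pyGetD hs est 0 with hhdef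
  by_cases hp : inp > 0
  · simp only [if_pos hp]
    by_cases hfull : h ≥ inp
    · have hm : min inp (max h 0) = inp := by omega
      simp only [if_pos hfull]
      rw [hm]; simp
    · simp only [if_neg hfull]
      by_cases hpart : h > 0
      · have hm : min inp (max h 0) = h := by omega
        simp only [if_pos hpart, pvDepositLoop_closed inp b h (by omega)]
        rw [hm]; simp
      · have hm : min inp (max h 0) = 0 := by omega
        simp only [if_neg hpart]
        rw [hm]
        simp only [sub_zero, add_zero]
        rw [hbdef, hhdef]
        simp [pySetD_pyGetD_self bs est hbs, pySetD_pyGetD_self hs est hhs]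
  · simp only [if_neg hp]
    by_cases hfull : b ≥ inp * (-1)
    · have hm : min (-inp) (max b 0) = -inp := by omega
      simp only [if_pos hfull]
      rw [hm]; simp
    · simp only [if_neg hfull]
      by_cases hpart : b > 0
      · have hm : min (-inp) (max b 0) = b := by omega
        simp only [if_pos hpart, pvWithdrawLoop_closed inp b h (by omega)]
        rw [hm]; simp
      · have hm : min (-inp) (max b 0) = 0 := by omega
        simp only [if_neg hpart]
        rw [hm]
        simp only [sub_zero, add_zero]
        rw [hbdef, hhdef]
        simp [pySetD_pyGetD_self bs est hbs, pySetD_pyGetD_self hs est hhs]
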